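-- pv_equiv track=rewrite | github.com/HannaLindwall/EITN41 | H2/B2.py | get_receivers
-- ===== SOURCE A (Python) =====
-- def get_receivers(disjoint_R, all_R, abu):
--     for element in all_R:
--         index = []
--         for j in range(0,len(disjoint_R)):
--             if(not(element.isdisjoint(disjoint_R[j]))):
--                 index.append(j)
--         if(len(index)==1):
--             disjoint_R[index[0]] = disjoint_R[index[0]] & element
--     return disjoint_R
-- ===== SOURCE B (Python) =====
-- def get_receivers(disjoint_R, all_R, abu):
--     # inverted index, kept current: idx[v] = set of j with v in disjoint_R[j]
--     idx = {}
--     for j, s in enumerate(disjoint_R):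
--         for v in s:
--             idx.setdefault(v, set()).add(j)
--     for element in all_R:
--         # collect hit indices from the members' buckets; two hits already
--         # rule out an update, so stop there
--         hits = set()
--         for v in element:
--             for j in idx.get(v, ()):
--                 hits.add(j)
--                 if len(hits) == 2:
--                     break
--             if len(hits) == 2:
--                 break
--         if len(hits) == 1:
--             (j,) = hits
--             new = disjoint_R[j] & element
--             for v in disjoint_R[j] - new:
--                 idx[v].discard(j)
--             disjoint_R[j] = new
--     return disjoint_R
-- ===== Notes on version B (the rewrite author's own statement) =====
-- stated objective: alternative
-- what changed: B builds an inverted index (value -> set of indices of the disjoint sets currently containing it, updated when a set shrinks) once, and for each element reads only the buckets of that element's own members, stopping as soon as two distinct hit indices are seen, instead of scanning every disjoint set per element.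
import Mathlib
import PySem

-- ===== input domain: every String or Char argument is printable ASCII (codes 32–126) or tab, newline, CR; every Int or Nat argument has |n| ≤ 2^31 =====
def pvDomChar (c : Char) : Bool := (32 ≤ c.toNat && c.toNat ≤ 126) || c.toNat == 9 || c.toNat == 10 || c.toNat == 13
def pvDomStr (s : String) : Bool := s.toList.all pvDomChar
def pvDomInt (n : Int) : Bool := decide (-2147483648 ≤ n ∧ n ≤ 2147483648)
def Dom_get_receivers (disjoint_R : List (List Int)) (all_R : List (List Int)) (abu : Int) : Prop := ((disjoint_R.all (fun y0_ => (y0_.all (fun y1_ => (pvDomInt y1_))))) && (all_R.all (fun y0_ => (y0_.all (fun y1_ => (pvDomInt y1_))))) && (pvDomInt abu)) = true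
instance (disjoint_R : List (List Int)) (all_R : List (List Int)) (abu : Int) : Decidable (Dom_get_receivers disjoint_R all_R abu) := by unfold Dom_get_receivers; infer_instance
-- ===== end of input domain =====

-- B replaces A's per-element scan of all of disjoint_R by an inverted index
-- (value -> indices of the sets currently containing it, updated when a set
-- shrinks) read only for the element's own members, stopping at two hits.
-- Return values are proved equal; both Pythons mutate disjoint_R in place in
-- the same way, so side effects agree too.

-- ===== PORT A =====
-- loop body of A's outer 'for element in all_R' loop, as a helper
def pvStepA (dR : List (List Int)) (element : List Int) : List (List Int) :=
  -- index = []; for j in range(0, len(disjoint_R)): if not element.isdisjoint(disjoint_R[j]): index.append(j)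
  let index : List Int :=
    (PySem.List.pyRange 0 (dR.length : Int) 1).foldl
      (fun idx j =>
        if !(PySem.Set.isdisjoint element (PySem.List.pyGetD dR j [])) then idx ++ [j] else idx)
      []
  -- if len(index) == 1: disjoint_R[index[0]] = disjoint_R[index[0]] & element
  if index.length == 1 then
    let j0 := PySem.List.pyGetD index 0 0
    dR.set j0.toNat (PySem.Set.inter (PySem.List.pyGetD dR j0 []) element)
  else dR

def get_receivers (disjoint_R : List (List Int)) (all_R : List (List Int)) (abu : Int) : List (List Int) :=
  all_R.foldl pvStepA disjoint_R

-- ===== PORT B =====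
-- idx = {}; for j, s in enumerate(disjoint_R): for v in s: idx.setdefault(v, set()).add(j)
def pvBuildIdx (dR : List (List Int)) : PySem.Dict Int (PySem.Set Int) :=
  (PySem.List.enumerate dR).foldl
    (fun idx p =>
      p.2.foldl (fun idx v => PySem.Dict.modify idx v [] (fun s => PySem.Set.add s p.1)) idx)
    PySem.Dict.empty

-- inner 'for j in idx.get(v, ()): hits.add(j); if len(hits) == 2: break' loop;
-- the Bool is the break flag
def pvTwoHitsInner (bucket : List Int) (hits : PySem.Set Int) : PySem.Set Int × Bool :=
  match bucket with
  | [] => (hits, false)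
  | j :: rest =>
      let h := PySem.Set.add hits j
      if PySem.Set.len h == 2 then (h, true) else pvTwoHitsInner rest h

-- outer 'for v in element: ...; if len(hits) == 2: break' loop
def pvTwoHits (idx : PySem.Dict Int (PySem.Set Int)) (element : List Int)
    (hits : PySem.Set Int) : PySem.Set Int :=
  match element with
  | [] => hits
  | v :: rest =>
      let r := pvTwoHitsInner (PySem.Dict.getD idx v []) hits
      if r.2 then r.1 else pvTwoHits idx rest r.1

-- loop body of B's outer 'for element in all_R' loop; the state is (disjoint_R, idx)
def pvStepB (st : List (List Int) × PySem.Dict Int (PySem.Set Int)) (element : List Int) :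
    List (List Int) × PySem.Dict Int (PySem.Set Int) :=
  let dR := st.1
  let idx := st.2
  let hits := pvTwoHits idx element PySem.Set.empty
  -- if len(hits) == 1: (j,) = hits; new = disjoint_R[j] & element;
  --   for v in disjoint_R[j] - new: idx[v].discard(j); disjoint_R[j] = new
  if PySem.Set.len hits == 1 then
    let j0 := hits.headI
    let old := PySem.List.pyGetD dR j0 []
    let newS := PySem.Set.inter old element
    let idx' := (PySem.Set.diff old newS).foldl
        (fun d v => PySem.Dict.modify d v [] (fun s => PySem.Set.discard s j0)) idx
    (dR.set j0.toNat newS, idx')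
  else st

def get_receivers_alt (disjoint_R : List (List Int)) (all_R : List (List Int)) (abu : Int) : List (List Int) :=
  (all_R.foldl pvStepB (disjoint_R, pvBuildIdx disjoint_R)).1

-- ===== PRECONDITION & SPEC =====
def Spec_get_receivers (disjoint_R : List (List Int)) (all_R : List (List Int)) (abu : Int) (out : List (List Int)) : Prop := out = get_receivers_alt disjoint_R all_R abu
instance (disjoint_R : List (List Int)) (all_R : List (List Int)) (abu : Int) (out : List (List Int)) : Decidable (Spec_get_receivers disjoint_R all_R abu out) := by unfold Spec_get_receivers; infer_instance

-- ===== CLAIM (what is proved, stated in full; the proofs are below) =====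
def Claim_equal_get_receivers : Prop := ∀ (disjoint_R : List (List Int)) (all_R : List (List Int)) (abu : Int), Dom_get_receivers disjoint_R all_R abu → Spec_get_receivers disjoint_R all_R abu (get_receivers disjoint_R all_R abu)

-- ===== LEMMAS AND PROOFS =====

-- the index invariant: a bucket of idx holds exactly the positions of the
-- current sets containing its value
def pvInvD (dR : List (List Int)) (idx : PySem.Dict Int (PySem.Set Int)) : Prop :=
  ∀ v j : Int, j ∈ PySem.Dict.getD idx v [] ↔
    ∃ k : Nat, k < dR.length ∧ j = (k : Int) ∧ v ∈ dR.getD k []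

-- one value's bucket, after the inner build loop over one set
theorem mem_inner_build (ws : List Int) :
    ∀ (d : PySem.Dict Int (PySem.Set Int)) (i v j : Int),
      j ∈ (ws.foldl (fun idx w => PySem.Dict.modify idx w [] (fun s => PySem.Set.add s i)) d).getD v [] ↔
        j ∈ d.getD v [] ∨ (v ∈ ws ∧ j = i) := by
  induction ws with
  | nil => intro d i v j; simp
  | cons w t ih =>
      intro d i v j
      simp only [List.foldl_cons]
      rw [ih]
      rw [PySem.Dict.getD_modify]
      by_cases hvw : v = w
      · rw [if_pos hvw]
        subst hvw
        rw [PySem.Set.mem_add]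
        simp only [List.mem_cons]
        tauto
      · rw [if_neg hvw]
        simp only [List.mem_cons]
        tauto

theorem mem_buildIdx_aux (l : List (Int × List Int)) :
    ∀ (d : PySem.Dict Int (PySem.Set Int)) (v j : Int),
      j ∈ (l.foldl
            (fun idx p => p.2.foldl (fun idx w => PySem.Dict.modify idx w [] (fun s => PySem.Set.add s p.1)) idx)
            d).getD v [] ↔
        j ∈ d.getD v [] ∨ ∃ p ∈ l, v ∈ p.2 ∧ j = p.1 := by
  induction l with
  | nil => intro d v j; simp
  | cons p t ih =>
      intro d v j
      simp only [List.foldl_cons]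
      rw [ih, mem_inner_build]
      simp only [List.mem_cons]
      constructor
      · rintro ((hj | ⟨hv, rfl⟩) | ⟨q, hq, hvq, rfl⟩)
        · exact Or.inl hj
        · exact Or.inr ⟨p, Or.inl rfl, hv, rfl⟩
        · exact Or.inr ⟨q, Or.inr hq, hvq, rfl⟩
      · rintro (hj | ⟨q, (rfl | hq), hvq, rfl⟩)
        · exact Or.inl (Or.inl hj)
        · exact Or.inl (Or.inr ⟨hvq, rfl⟩)
        · exact Or.inr ⟨q, hq, hvq, rfl⟩

-- the freshly built index satisfies the invariant
theorem invD_buildIdx (dR : List (List Int)) : pvInvD dR (pvBuildIdx dR) := by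
  intro v j
  unfold pvBuildIdx
  rw [mem_buildIdx_aux]
  simp only [PySem.Dict.getD_empty, List.not_mem_nil, false_or]
  constructor
  · rintro ⟨p, hp, hv, rfl⟩
    rcases (PySem.List.mem_enumerate_iff _ _ _).mp hp with ⟨k, hk, rfl⟩
    refine ⟨k, hk, by simp, ?_⟩
    simpa [List.getD_eq_getElem?_getD, List.getElem?_eq_getElem hk] using hv
  · rintro ⟨k, hk, rfl, hv⟩
    refine ⟨((0 : Int) + k, dR[k]), ?_, ?_, by simp⟩
    · exact (PySem.List.mem_enumerate_iff _ _ _).mpr ⟨k, hk, rfl⟩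
    · simpa [List.getD_eq_getElem?_getD, List.getElem?_eq_getElem hk] using hv

-- the full (non-truncated) hits accumulation, used only in the proofs
def pvFullHits (idx : PySem.Dict Int (PySem.Set Int)) (element : List Int)
    (s : PySem.Set Int) : PySem.Set Int :=
  element.foldl (fun hs v => PySem.Set.update hs (PySem.Dict.getD idx v [])) s

theorem mem_fullHits (idx : PySem.Dict Int (PySem.Set Int)) (element : List Int) :
    ∀ (s : PySem.Set Int) (j : Int),
      j ∈ pvFullHits idx element s ↔ j ∈ s ∨ ∃ v ∈ element, j ∈ PySem.Dict.getD idx v [] := by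
  induction element with
  | nil => intro s j; simp [pvFullHits]
  | cons a t ih =>
      intro s j
      simp only [pvFullHits, List.foldl_cons]
      rw [show (List.foldl (fun hs v => PySem.Set.update hs (PySem.Dict.getD idx v []))
        (PySem.Set.update s (PySem.Dict.getD idx a [])) t) =
        pvFullHits idx t (PySem.Set.update s (PySem.Dict.getD idx a [])) from rfl]
      rw [ih, PySem.Set.mem_update]
      simp only [List.mem_cons]
      constructor
      · rintro ((hj | hb) | ⟨v, hv, hbv⟩)
        · exact Or.inl hj
        · exact Or.inr ⟨a, Or.inl rfl, hb⟩
        · exact Or.inr ⟨v, Or.inr hv, hbv⟩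
      · rintro (hj | ⟨v, (rfl | hv), hbv⟩)
        · exact Or.inl (Or.inl hj)
        · exact Or.inl (Or.inr hbv)
        · exact Or.inr ⟨v, hv, hbv⟩

theorem nodup_fullHits (idx : PySem.Dict Int (PySem.Set Int)) (element : List Int) :
    ∀ s : PySem.Set Int, s.Nodup → (pvFullHits idx element s).Nodup := by
  induction element with
  | nil => intro s hs; simpa [pvFullHits]
  | cons a t ih =>
      intro s hs
      simp only [pvFullHits, List.foldl_cons]
      exact ih _ (PySem.Set.nodup_update _ _ hs)

theorem fullHits_extends (idx : PySem.Dict Int (PySem.Set Int)) (element : List Int) :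
    ∀ s : PySem.Set Int, ∃ t : List Int, pvFullHits idx element s = s ++ t := by
  induction element with
  | nil => intro s; exact ⟨[], by simp [pvFullHits]⟩
  | cons a t ih =>
      intro s
      simp only [pvFullHits, List.foldl_cons]
      obtain ⟨t2, ht2⟩ := ih (PySem.Set.update s (PySem.Dict.getD idx a []))
      rw [show (List.foldl (fun hs v => PySem.Set.update hs (PySem.Dict.getD idx v []))
        (PySem.Set.update s (PySem.Dict.getD idx a [])) t) =
        pvFullHits idx t (PySem.Set.update s (PySem.Dict.getD idx a [])) from rfl, ht2,
        PySem.Set.update_eq_append_filter]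
      exact ⟨_, by rw [List.append_assoc]⟩

theorem take_two_append (l t : List Int) (h : 2 ≤ l.length) : (l ++ t).take 2 = l.take 2 := by
  match l, h with
  | a :: b :: l2, _ => simp

-- the truncated inner loop computes 'take 2' of the full accumulation
theorem twoHitsInner_spec (bucket : List Int) :
    ∀ s : PySem.Set Int, s.Nodup → s.length ≤ 1 →
      pvTwoHitsInner bucket s =
        ((PySem.Set.update s bucket).take 2, decide (2 ≤ (PySem.Set.update s bucket).length)) := by
  induction bucket with
  | nil =>
      intro s _ hlen
      rw [pvTwoHitsInner, PySem.Set.update_nil]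
      rw [List.take_of_length_le (by omega)]
      have hd : decide (2 ≤ s.length) = false := decide_eq_false (by omega)
      rw [hd]
  | cons j rest ih =>
      intro s hnd hlen
      rw [pvTwoHitsInner, PySem.Set.update_cons]
      have hadd := PySem.Set.add_eq_ite s j
      have hlenadd : (PySem.Set.add s j).length ≤ 2 := by
        rw [hadd]; split
        · omega
        · simp only [List.length_append, List.length_singleton]
          omega
      by_cases h2 : (PySem.Set.add s j).length = 2
      · rw [if_pos (by simp [PySem.Set.len]; omega)]
        obtain ⟨t, ht⟩ : ∃ t, PySem.Set.update (PySem.Set.add s j) rest = PySem.Set.add s j ++ t :=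
          ⟨_, PySem.Set.update_eq_append_filter _ _⟩
        rw [ht, take_two_append _ _ (by omega)]
        rw [List.take_of_length_le (by omega)]
        have : decide (2 ≤ (PySem.Set.add s j ++ t).length) = true := by
          simp [List.length_append]; omega
        rw [this]
      · rw [if_neg (by simp [PySem.Set.len]; omega)]
        exact ih _ (PySem.Set.nodup_add _ _ hnd) (by omega)

-- the truncated nested loop computes 'take 2' of the full accumulation
theorem twoHits_spec (idx : PySem.Dict Int (PySem.Set Int)) (element : List Int) :
    ∀ s : PySem.Set Int, s.Nodup → s.length ≤ 1 →
      pvTwoHits idx element s = (pvFullHits idx element s).take 2 := by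
  induction element with
  | nil =>
      intro s _ hlen
      rw [pvTwoHits]
      simp only [pvFullHits, List.foldl_nil]
      rw [List.take_of_length_le (by omega)]
  | cons v rest ih =>
      intro s hnd hlen
      rw [pvTwoHits, twoHitsInner_spec _ _ hnd hlen]
      simp only []
      have hfull : pvFullHits idx (v :: rest) s =
          pvFullHits idx rest (PySem.Set.update s (PySem.Dict.getD idx v [])) := rfl
      by_cases h2 : 2 ≤ (PySem.Set.update s (PySem.Dict.getD idx v [])).length
      · rw [if_pos (by simp [h2])]
        obtain ⟨t, ht⟩ := fullHits_extends idx rest (PySem.Set.update s (PySem.Dict.getD idx v []))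
        rw [hfull, ht, take_two_append _ _ h2]
      · rw [if_neg (by simp [h2])]
        rw [List.take_of_length_le (by omega)]
        rw [hfull]
        exact ih _ (PySem.Set.nodup_update _ _ hnd) (by omega)

-- characterisation of A's per-element index list
theorem index_eq_filter (dR : List (List Int)) (element : List Int) :
    (PySem.List.pyRange 0 (dR.length : Int) 1).foldl
        (fun idx j =>
          if !(PySem.Set.isdisjoint element (PySem.List.pyGetD dR j [])) then idx ++ [j] else idx)
        [] =
      (PySem.List.pyRange 0 (dR.length : Int) 1).filter
        (fun j => !(PySem.Set.isdisjoint element (PySem.List.pyGetD dR j []))) := by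
  rw [PySem.List.foldl_append_if]
  simp

-- bucket membership after the discard loop over the dropped values
theorem mem_getD_foldl_discard (l : List Int) (j : Int) :
    ∀ (d : PySem.Dict Int (PySem.Set Int)) (w x : Int),
      x ∈ (l.foldl (fun d v => PySem.Dict.modify d v [] (fun s => PySem.Set.discard s j)) d).getD w [] ↔
        x ∈ d.getD w [] ∧ ¬(w ∈ l ∧ x = j) := by
  induction l with
  | nil => intro d w x; simp
  | cons a t ih =>
      intro d w x
      simp only [List.foldl_cons]
      rw [ih, PySem.Dict.getD_modify]
      by_cases hw : w = a
      · subst hw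
        rw [if_pos rfl, PySem.Set.mem_discard]
        simp only [List.mem_cons, true_or, true_and]
        tauto
      · rw [if_neg hw]
        simp only [List.mem_cons]
        constructor
        · rintro ⟨hx, hn⟩
          exact ⟨hx, by tauto⟩
        · rintro ⟨hx, hn⟩
          exact ⟨hx, by tauto⟩

theorem getD_set_self (l : List (List Int)) (i : Nat) (w : List Int) (h : i < l.length) :
    (l.set i w).getD i [] = w := by
  rw [List.getD_eq_getElem?_getD, List.getElem?_set_self]
  · simp
  · exact h

theorem getD_set_ne (l : List (List Int)) (i k : Nat) (w : List Int) (h : i ≠ k) :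
    (l.set i w).getD k [] = l.getD k [] := by
  rw [List.getD_eq_getElem?_getD, List.getElem?_set_ne h, ← List.getD_eq_getElem?_getD]

-- the invariant survives B's shrink-and-discard update
theorem invD_update (dR : List (List Int)) (idx : PySem.Dict Int (PySem.Set Int))
    (hinv : pvInvD dR idx) (k0 : Nat) (hk0 : k0 < dR.length) (element : List Int) :
    pvInvD (dR.set k0 (PySem.Set.inter (dR.getD k0 []) element))
      ((PySem.Set.diff (dR.getD k0 []) (PySem.Set.inter (dR.getD k0 []) element)).foldl
        (fun d v => PySem.Dict.modify d v [] (fun s => PySem.Set.discard s (k0 : Int))) idx) := by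
  intro v' j'
  rw [mem_getD_foldl_discard]
  constructor
  · rintro ⟨hmemb, hnot⟩
    obtain ⟨k, hk, rfl, hvk⟩ := (hinv v' j').mp hmemb
    by_cases hkk : k = k0
    · subst hkk
      have hvnew : v' ∈ PySem.Set.inter (dR.getD k []) element := by
        by_contra hno
        exact hnot ⟨by rw [PySem.Set.mem_diff]; exact ⟨hvk, hno⟩, rfl⟩
      refine ⟨k, by simpa using hk, rfl, ?_⟩
      rw [getD_set_self _ _ _ hk0]
      exact hvnew
    · refine ⟨k, by simpa using hk, rfl, ?_⟩
      rw [getD_set_ne _ _ _ _ (fun h => hkk h.symm)]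
      exact hvk
  · rintro ⟨k, hk, rfl, hvk⟩
    have hk' : k < dR.length := by simpa using hk
    by_cases hkk : k = k0
    · subst hkk
      rw [getD_set_self _ _ _ hk0] at hvk
      have hvold : v' ∈ dR.getD k [] := by
        rw [PySem.Set.mem_inter] at hvk
        exact hvk.1
      refine ⟨(hinv v' _).mpr ⟨k, hk0, rfl, hvold⟩, ?_⟩
      rintro ⟨hdiff, _⟩
      rw [PySem.Set.mem_diff] at hdiff
      exact hdiff.2 hvk
    · rw [getD_set_ne _ _ _ _ (fun h => hkk h.symm)] at hvk
      refine ⟨(hinv v' _).mpr ⟨k, hk', rfl, hvk⟩, ?_⟩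
      rintro ⟨_, hj⟩
      exact hkk (by exact_mod_cast hj)

-- both step functions act identically on the list, and the invariant survives
theorem step_both (dR : List (List Int)) (idx : PySem.Dict Int (PySem.Set Int))
    (element : List Int) (hinv : pvInvD dR idx) :
    pvStepA dR element = (pvStepB (dR, idx) element).1 ∧
      pvInvD (pvStepB (dR, idx) element).1 (pvStepB (dR, idx) element).2 := by
  set F := pvFullHits idx element PySem.Set.empty with hF
  have hhits : pvTwoHits idx element PySem.Set.empty = F.take 2 := by
    rw [hF]
    exact twoHits_spec idx element PySem.Set.empty (by simp [PySem.Set.empty])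
      (by simp [PySem.Set.empty])
  have hmemF : ∀ j : Int, j ∈ F ↔ ∃ v ∈ element, j ∈ PySem.Dict.getD idx v [] := by
    intro j
    rw [hF, mem_fullHits]
    simp [PySem.Set.empty]
  have hndF : F.Nodup := nodup_fullHits idx element PySem.Set.empty List.nodup_nil
  set index := (PySem.List.pyRange 0 (dR.length : Int) 1).filter
      (fun j => !(PySem.Set.isdisjoint element (PySem.List.pyGetD dR j []))) with hindex
  have hmem : ∀ j : Int, j ∈ index ↔ j ∈ F := by
    intro j
    rw [hindex, List.mem_filter, PySem.List.mem_pyRange_one, hmemF]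
    constructor
    · rintro ⟨⟨h0, hjn⟩, hc⟩
      rw [Bool.not_eq_true', ← Bool.not_eq_true, PySem.Set.isdisjoint_iff] at hc
      push_neg at hc
      obtain ⟨v, hv, hvd⟩ := hc
      refine ⟨v, hv, ?_⟩
      rw [hinv]
      have hj : j = ((j.toNat : Nat) : Int) := (Int.toNat_of_nonneg h0).symm
      refine ⟨j.toNat, by omega, hj, ?_⟩
      have hjd : PySem.List.pyGetD dR j [] = dR.getD j.toNat [] := by
        rw [hj, PySem.List.pyGetD_natCast]; simp; rw [max_eq_left h0]
      rw [← hjd]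
      exact hvd
    · rintro ⟨v, hv, hg⟩
      rw [hinv] at hg
      obtain ⟨k, hk, rfl, hvk⟩ := hg
      refine ⟨⟨by omega, by omega⟩, ?_⟩
      rw [Bool.not_eq_true', ← Bool.not_eq_true, PySem.Set.isdisjoint_iff]
      push_neg
      refine ⟨v, hv, ?_⟩
      rw [PySem.List.pyGetD_natCast]
      exact hvk
  have hndI : index.Nodup := by
    rw [hindex]
    exact (PySem.List.nodup_pyRange_one 0 (dR.length : Int)).filter _
  have hperm : index.Perm F := (List.perm_ext_iff_of_nodup hndI hndF).mpr hmem
  have hlenIF : index.length = F.length := hperm.length_eq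
  by_cases h1 : F.length = 1
  · obtain ⟨b, hb⟩ := List.length_eq_one_iff.mp h1
    obtain ⟨a, ha⟩ := List.length_eq_one_iff.mp (show index.length = 1 by omega)
    have hab : a = b := by
      have := (hmem a).mp (by rw [ha]; exact List.mem_singleton_self a)
      rw [hb] at this
      simpa using this
    have hbF : b ∈ F := by rw [hb]; exact List.mem_singleton_self b
    obtain ⟨v0, hv0, hbv⟩ := (hmemF b).mp hbF
    obtain ⟨k0, hk0, hbk, hv0k⟩ := (hinv v0 b).mp hbv
    subst hbk
    have htake : F.take 2 = [(k0 : Int)] := by rw [hb]; simp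
    have hpy : PySem.List.pyGetD dR ((k0 : Nat) : Int) [] = dR.getD k0 [] := by
      rw [PySem.List.pyGetD_natCast]
    have hstep : pvStepB (dR, idx) element =
        (dR.set k0 (PySem.Set.inter (dR.getD k0 []) element),
         (PySem.Set.diff (dR.getD k0 []) (PySem.Set.inter (dR.getD k0 []) element)).foldl
           (fun d v => PySem.Dict.modify d v [] (fun s => PySem.Set.discard s (k0 : Int))) idx) := by
      simp only [pvStepB]
      rw [hhits, htake]
      rw [if_pos (by simp [PySem.Set.len])]
      simp only [List.headI, hpy, Int.toNat_natCast]
    have hA : pvStepA dR element = dR.set k0 (PySem.Set.inter (dR.getD k0 []) element) := by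
      simp only [pvStepA]
      rw [index_eq_filter, ← hindex, ha, hab]
      rw [if_pos (by simp)]
      simp only [PySem.List.pyGetD_zero_cons, hpy, Int.toNat_natCast]
    refine ⟨by rw [hA, hstep], ?_⟩
    rw [hstep]
    exact invD_update dR idx hinv k0 hk0 element
  · have hstep : pvStepB (dR, idx) element = (dR, idx) := by
      simp only [pvStepB]
      rw [hhits]
      rw [if_neg (by simp [PySem.Set.len, List.length_take]; omega)]
    have hA : pvStepA dR element = dR := by
      simp only [pvStepA]
      rw [index_eq_filter, ← hindex]
      rw [if_neg (by simpa using (show ¬ index.length = 1 by omega))]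
    exact ⟨by rw [hA, hstep], by rw [hstep]; exact hinv⟩

theorem fold_both (all_R : List (List Int)) :
    ∀ (dR : List (List Int)) (idx : PySem.Dict Int (PySem.Set Int)), pvInvD dR idx →
      all_R.foldl pvStepA dR = (all_R.foldl pvStepB (dR, idx)).1 := by
  induction all_R with
  | nil => intro dR idx _; rfl
  | cons e rest ih =>
      intro dR idx h
      obtain ⟨heq, hinv⟩ := step_both dR idx e h
      simp only [List.foldl_cons]
      rw [heq]
      exact ih _ _ hinv

-- ===== VERDICT (by name: the statement is the Claim_ definition above) =====
theorem get_receivers_spec : Claim_equal_get_receivers := by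
  intro disjoint_R all_R abu _
  show get_receivers disjoint_R all_R abu = get_receivers_alt disjoint_R all_R abu
  unfold get_receivers get_receivers_alt
  exact fold_both all_R disjoint_R (pvBuildIdx disjoint_R) (invD_buildIdx disjoint_R)
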